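-- pv_equiv track=rewrite | github.com/AlexanderTankov/HackBulgaria-Programming-101 | Week 0/Part 1/biggest_difference.py | biggest_difference
-- ===== SOURCE A (Python) =====
-- def biggest_difference(arr):
--     less_num = arr[0]
--     biggest_num = arr[0]
--     less_num_idx = 0
--     biggest_num_idx = 0
--     temp_index = 0
--     for num in arr:
--         if(num < less_num):
--             less_num = num
--             less_num_idx = temp_index
--         elif(num > biggest_num):
--             biggest_num = num
--             biggest_num_idx = temp_index
--         temp_index += 1
--     if less_num_idx < biggest_num_idx:
--         return arr[less_num_idx] - arr[biggest_num_idx]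
--     else:
--         return arr[biggest_num_idx] - arr[less_num_idx]
-- ===== SOURCE B (Python) =====
-- def biggest_difference(arr):
--     lo = hi = arr[-1]
--     min_first = False
--     for x in reversed(arr[:-1]):
--         if x <= lo and x >= hi:
--             lo = x
--             hi = x
--             min_first = False
--         elif x <= lo:
--             lo = x
--             min_first = True
--         elif x >= hi:
--             hi = x
--             min_first = False
--     return lo - hi if min_first else hi - lo
-- ===== Notes on version B (the rewrite author's own statement) =====
-- stated objective: alternative
-- what changed: B scans the array right-to-left maintaining (lo, hi, min_first) with no index bookkeeping: the order sign is kept as a boolean that is refreshed whenever a new extremum appears at the front, instead of A's left-to-right pass tracking and finally comparing two stored indices.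
import Mathlib
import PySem

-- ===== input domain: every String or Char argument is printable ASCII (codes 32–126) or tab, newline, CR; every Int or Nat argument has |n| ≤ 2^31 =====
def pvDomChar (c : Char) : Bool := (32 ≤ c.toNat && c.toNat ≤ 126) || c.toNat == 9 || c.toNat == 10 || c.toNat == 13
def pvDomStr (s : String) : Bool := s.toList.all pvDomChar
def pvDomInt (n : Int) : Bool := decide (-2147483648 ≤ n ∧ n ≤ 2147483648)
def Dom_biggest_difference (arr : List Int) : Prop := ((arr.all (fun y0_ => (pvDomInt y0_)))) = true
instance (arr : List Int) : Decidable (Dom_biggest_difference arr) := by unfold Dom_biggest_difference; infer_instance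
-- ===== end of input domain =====

-- B replaces A's left-to-right index-tracking pass by a right-to-left scan that keeps
-- only (lo, hi, min_first) — the order sign as a boolean, no indices (objective: alternative).

-- ===== PORT A =====
-- loop body of A: state (less_num, biggest_num, less_num_idx, biggest_num_idx, temp_index)
def Astep_biggest_difference (st : Int × Int × Nat × Nat × Nat) (num : Int) :
    Int × Int × Nat × Nat × Nat :=
  let (l, b, li, bi, t) := st
  if num < l then (num, b, t, bi, t + 1)
  else if num > b then (l, num, li, t, t + 1)
  else (l, b, li, bi, t + 1)

def biggest_difference (arr : List Int) : Int :=
  -- arr[0]: IndexError on [] (excluded by Pre_); .getD 0 is unreachable inside Pre_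
  let first := (PySem.List.pyGet? arr (0 : Int)).getD 0
  let st := arr.foldl Astep_biggest_difference (first, first, 0, 0, 0)
  let li := st.2.2.1
  let bi := st.2.2.2.1
  if li < bi then
    (PySem.List.pyGet? arr (li : Int)).getD 0 - (PySem.List.pyGet? arr (bi : Int)).getD 0
  else
    (PySem.List.pyGet? arr (bi : Int)).getD 0 - (PySem.List.pyGet? arr (li : Int)).getD 0

-- ===== PORT B =====
-- loop body of B: state (lo, hi, min_first), fed the elements of arr[:-1] from the right
def Bstep_biggest_difference (st : Int × Int × Bool) (x : Int) : Int × Int × Bool :=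
  let (lo, hi, f) := st
  if x ≤ lo ∧ hi ≤ x then (x, x, false)
  else if x ≤ lo then (x, hi, true)
  else if hi ≤ x then (lo, x, false)
  else (lo, hi, f)

def biggest_difference_alt (arr : List Int) : Int :=
  -- arr[-1]: IndexError on [] (excluded by Pre_); .getD 0 is unreachable inside Pre_
  let last := (PySem.List.pyGet? arr (-1 : Int)).getD 0
  let st := ((PySem.List.slice arr none (some (-1 : Int))).reverse).foldl
      Bstep_biggest_difference (last, last, false)
  if st.2.2 then st.1 - st.2.1 else st.2.1 - st.1

-- ===== PRECONDITION & SPEC =====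
-- A raises IndexError on the empty list (arr[0]); B raises IndexError there too (arr[-1]).
def Pre_biggest_difference (arr : List Int) : Prop := arr ≠ []
instance (arr : List Int) : Decidable (Pre_biggest_difference arr) := by
  unfold Pre_biggest_difference; infer_instance

def pvWitness_biggest_difference : List Int := [3, 1, 5, 2]

def Spec_biggest_difference (arr : List Int) (out : Int) : Prop := out = biggest_difference_alt arr
instance (arr : List Int) (out : Int) : Decidable (Spec_biggest_difference arr out) := by
  unfold Spec_biggest_difference; infer_instance

-- ===== CLAIM (what is proved, stated in full; the proofs are below) =====
def Claim_equal_biggest_difference : Prop := ∀ (arr : List Int), Dom_biggest_difference arr → Pre_biggest_difference arr → Spec_biggest_difference arr (biggest_difference arr)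

-- ===== LEMMAS AND PROOFS =====

-- the state A's loop holds after processing the prefix x :: xs
def pvStA (x : Int) (xs : List Int) : Int × Int × Nat × Nat × Nat :=
  let l := xs.foldl min x
  let b := xs.foldl max x
  (l, b, (PySem.List.index? (x :: xs) l).getD 0, (PySem.List.index? (x :: xs) b).getD 0,
    xs.length + 1)

theorem pvStA_step (x : Int) (xs : List Int) (v : Int) :
    Astep_biggest_difference (pvStA x xs) v = pvStA x (xs ++ [v]) := by
  have hl := PySem.List.foldl_min_le xs x
  have hb := PySem.List.le_foldl_max xs x
  have hlmem : xs.foldl min x ∈ x :: xs := by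
    rcases PySem.List.foldl_min_mem xs x with h | h
    · rw [h]; exact List.mem_cons_self
    · exact List.mem_cons_of_mem _ h
  have hbmem : xs.foldl max x ∈ x :: xs := by
    rcases PySem.List.foldl_max_mem xs x with h | h
    · rw [h]; exact List.mem_cons_self
    · exact List.mem_cons_of_mem _ h
  have hlb : xs.foldl min x ≤ xs.foldl max x := le_trans hl.1 hb.1
  have hcons : x :: (xs ++ [v]) = (x :: xs) ++ [v] := by simp
  simp only [pvStA, Astep_biggest_difference, List.foldl_append, List.foldl_cons,
    List.foldl_nil]
  split_ifs with h1 h2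
  · have hmin : min (xs.foldl min x) v = v := min_eq_right (le_of_lt h1)
    have hmax : max (xs.foldl max x) v = xs.foldl max x := max_eq_left (by omega)
    have hnot : v ∉ x :: xs := by
      intro hmem
      rcases List.mem_cons.mp hmem with h | h
      · have := hl.1; omega
      · have := hl.2 v h; omega
    rw [hmin, hmax, hcons, PySem.List.index?_append_singleton_self _ _ hnot,
      PySem.List.index?_append_of_mem [v] hbmem]
    simp
  · have hmin : min (xs.foldl min x) v = xs.foldl min x := min_eq_left (by omega)
    have hmax : max (xs.foldl max x) v = v := max_eq_right (le_of_lt h2)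
    have hnot : v ∉ x :: xs := by
      intro hmem
      rcases List.mem_cons.mp hmem with h | h
      · have := hb.1; omega
      · have := hb.2 v h; omega
    rw [hmin, hmax, hcons, PySem.List.index?_append_singleton_self _ _ hnot,
      PySem.List.index?_append_of_mem [v] hlmem]
    simp
  · have hmin : min (xs.foldl min x) v = xs.foldl min x := min_eq_left (by omega)
    have hmax : max (xs.foldl max x) v = xs.foldl max x := max_eq_left (by omega)
    rw [hmin, hmax, hcons, PySem.List.index?_append_of_mem [v] hlmem,
      PySem.List.index?_append_of_mem [v] hbmem]
    simp

theorem pvStA_loop (suf : List Int) (x : Int) (xs : List Int) :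
    suf.foldl Astep_biggest_difference (pvStA x xs) = pvStA x (xs ++ suf) := by
  induction suf generalizing xs with
  | nil => simp
  | cons v s ih =>
      rw [List.foldl_cons, pvStA_step, ih, List.append_assoc]
      rfl

theorem pvStA_init (x : Int) :
    Astep_biggest_difference (x, x, 0, 0, 0) x = pvStA x [] := by
  simp [Astep_biggest_difference, pvStA]

-- the state B's right-to-left scan holds over the suffix x :: xs, defined structurally
def pvB (x : Int) : List Int → Int × Int × Bool
  | [] => (x, x, false)
  | y :: ys => Bstep_biggest_difference (pvB y ys) x

-- characterisation of B's state: extrema plus the index-order boolean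
def pvStB (x : Int) (xs : List Int) : Int × Int × Bool :=
  let l := xs.foldl min x
  let b := xs.foldl max x
  (l, b, decide ((PySem.List.index? (x :: xs) l).getD 0 < (PySem.List.index? (x :: xs) b).getD 0))

theorem foldl_min_prepend (l : List Int) (a b : Int) :
    l.foldl min (min a b) = min a (l.foldl min b) := by
  induction l generalizing b with
  | nil => rfl
  | cons y ys ih => simp [List.foldl_cons, min_assoc, ih]

theorem foldl_max_prepend (l : List Int) (a b : Int) :
    l.foldl max (max a b) = max a (l.foldl max b) := by
  induction l generalizing b with
  | nil => rfl
  | cons y ys ih => simp [List.foldl_cons, max_assoc, ih]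

theorem pvStB_prepend (x y : Int) (ys : List Int) :
    Bstep_biggest_difference (pvStB y ys) x = pvStB x (y :: ys) := by
  have hl := PySem.List.foldl_min_le ys y
  have hb := PySem.List.le_foldl_max ys y
  set m := ys.foldl min y with hm
  set M := ys.foldl max y with hM
  have hlmem : m ∈ y :: ys := by
    rcases PySem.List.foldl_min_mem ys y with h | h
    · rw [hm, h]; exact List.mem_cons_self
    · exact List.mem_cons_of_mem _ h
  have hbmem : M ∈ y :: ys := by
    rcases PySem.List.foldl_max_mem ys y with h | h
    · rw [hM, h]; exact List.mem_cons_self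
    · exact List.mem_cons_of_mem _ h
  have hmM : m ≤ M := le_trans hl.1 hb.1
  have hmin : (y :: ys).foldl min x = min x m := by
    rw [List.foldl_cons, foldl_min_prepend, ← hm]
  have hmax : (y :: ys).foldl max x = max x M := by
    rw [List.foldl_cons, foldl_max_prepend, ← hM]
  simp only [pvStB, Bstep_biggest_difference, hmin, hmax, ← hm, ← hM]
  split_ifs with h1 h2 h3
  · -- x ≤ m and M ≤ x : all three coincide, both indices are 0
    obtain ⟨hxl, hxb⟩ := h1
    have hxm : min x m = x := min_eq_left hxl
    have hxM : max x M = x := max_eq_left hxb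
    rw [hxm, hxM, PySem.List.index?_cons_self]
    simp
  · -- x ≤ m, x < M : x is the new first min at index 0, M keeps index > 0
    have hxM : x < M := by
      by_contra hc
      exact h1 ⟨h2, by omega⟩
    have hxm : min x m = x := min_eq_left h2
    have hmaxx : max x M = M := max_eq_right (le_of_lt hxM)
    obtain ⟨bi, hbi⟩ := Option.isSome_iff_exists.mp
      ((PySem.List.index?_isSome_iff (y :: ys) M).mpr hbmem)
    rw [hxm, hmaxx, PySem.List.index?_cons_self,
      PySem.List.index?_cons_of_ne _ (by omega : x ≠ M), hbi]
    simp
  · -- m < x, M ≤ x : x is the new first max at index 0, m keeps index > 0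
    have hmx : m < x := by omega
    have hxm : min x m = m := min_eq_right (le_of_lt hmx)
    have hmaxx : max x M = x := max_eq_left h3
    obtain ⟨li, hli⟩ := Option.isSome_iff_exists.mp
      ((PySem.List.index?_isSome_iff (y :: ys) m).mpr hlmem)
    rw [hxm, hmaxx, PySem.List.index?_cons_self,
      PySem.List.index?_cons_of_ne _ (by omega : x ≠ m), hli]
    simp
  · -- m < x < M : extrema are unchanged, both indices shift by one
    have hmx : m < x := by omega
    have hxM : x < M := by omega
    have hxm : min x m = m := min_eq_right (le_of_lt hmx)
    have hmaxx : max x M = M := max_eq_right (le_of_lt hxM)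
    obtain ⟨li, hli⟩ := Option.isSome_iff_exists.mp
      ((PySem.List.index?_isSome_iff (y :: ys) m).mpr hlmem)
    obtain ⟨bi, hbi⟩ := Option.isSome_iff_exists.mp
      ((PySem.List.index?_isSome_iff (y :: ys) M).mpr hbmem)
    rw [hxm, hmaxx, PySem.List.index?_cons_of_ne _ (by omega : x ≠ m),
      PySem.List.index?_cons_of_ne _ (by omega : x ≠ M), hli, hbi]
    simp

theorem pvB_char (xs : List Int) : ∀ x : Int, pvB x xs = pvStB x xs := by
  induction xs with
  | nil =>
      intro x
      simp [pvB, pvStB]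
  | cons y ys ih =>
      intro x
      rw [pvB, ih y, pvStB_prepend]

-- B's fold over reversed arr[:-1], started from the last element, computes pvB
theorem pvB_fold (xs : List Int) : ∀ x : Int,
    (((x :: xs).dropLast).reverse).foldl Bstep_biggest_difference
        ((x :: xs).getLast?.getD 0, (x :: xs).getLast?.getD 0, false)
      = pvB x xs := by
  induction xs with
  | nil => intro x; simp [pvB]
  | cons y ys ih =>
      intro x
      have h1 : (x :: y :: ys).dropLast = x :: (y :: ys).dropLast := by
        simp [List.dropLast_cons₂]
      have h2 : (x :: y :: ys).getLast? = (y :: ys).getLast? := by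
        simp [List.getLast?_cons_cons]
      rw [h1, h2, List.reverse_cons, List.foldl_append, ih y]
      simp [pvB]

-- ===== VERDICT (by name: the statement is the Claim_ definition above) =====
theorem biggest_difference_spec : Claim_equal_biggest_difference := by
  intro arr _ hpre
  match arr, hpre with
  | x :: xs, _ =>
    unfold Spec_biggest_difference
    have hfirst : (PySem.List.pyGet? (x :: xs) (0 : Int)).getD 0 = x := by
      simp [PySem.List.pyGet?, PySem.List.pyIdx?]
    have hslice : PySem.List.slice (x :: xs) none (some (-1 : Int)) = (x :: xs).dropLast :=
      PySem.List.slice_to_neg_one _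
    have hfold : (x :: xs).foldl Astep_biggest_difference (x, x, 0, 0, 0) = pvStA x xs := by
      rw [List.foldl_cons, pvStA_init, pvStA_loop, List.nil_append]
    set l := xs.foldl min x with hldef
    set b := xs.foldl max x with hbdef
    have hlmem : l ∈ x :: xs := by
      rcases PySem.List.foldl_min_mem xs x with h | h
      · rw [hldef, h]; exact List.mem_cons_self
      · exact List.mem_cons_of_mem _ h
    have hbmem : b ∈ x :: xs := by
      rcases PySem.List.foldl_max_mem xs x with h | h
      · rw [hbdef, h]; exact List.mem_cons_self
      · exact List.mem_cons_of_mem _ h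
    obtain ⟨li, hli⟩ := Option.isSome_iff_exists.mp
      ((PySem.List.index?_isSome_iff (x :: xs) l).mpr hlmem)
    obtain ⟨bi, hbi⟩ := Option.isSome_iff_exists.mp
      ((PySem.List.index?_isSome_iff (x :: xs) b).mpr hbmem)
    obtain ⟨hlk, hlval, -⟩ := PySem.List.getElem_of_index?_eq_some hli
    obtain ⟨hbk, hbval, -⟩ := PySem.List.getElem_of_index?_eq_some hbi
    have hgl : (PySem.List.pyGet? (x :: xs) (li : Int)).getD 0 = l := by
      rw [PySem.List.pyGet?_natCast, List.getElem?_eq_getElem hlk, hlval]; rfl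
    have hgb : (PySem.List.pyGet? (x :: xs) (bi : Int)).getD 0 = b := by
      rw [PySem.List.pyGet?_natCast, List.getElem?_eq_getElem hbk, hbval]; rfl
    have hA : biggest_difference (x :: xs) = if li < bi then l - b else b - l := by
      simp only [biggest_difference, hfirst, hfold, pvStA, ← hldef, ← hbdef, hli, hbi,
        Option.getD_some, hgl, hgb]
    have hB : biggest_difference_alt (x :: xs) = if li < bi then l - b else b - l := by
      simp only [biggest_difference_alt, PySem.List.pyGet?_neg_one, hslice]
      rw [pvB_fold xs x, pvB_char]
      simp only [pvStB, ← hldef, ← hbdef, hli, hbi, Option.getD_some]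
      by_cases h : li < bi <;> simp [h]
    rw [hA, hB]
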